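-- pv_equiv track=rewrite | github.com/wilhelmshen/slowdown | src/slowdown/http.py | translate_url
-- ===== SOURCE A (Python) =====
-- def translate_url(base, url):
--     if not base.endswith('/'):
--         base = base + '/'
--     url = url.lstrip('/')
--     p = url.rfind('/')
--     if -1 == p:
--         result = base + url
--         if result.startswith('//'):
--             return result[1:]
--         return result
--     parts = []
--     for part in url[:p].split('/'):
--         if '..' == part:
--             if len(parts) > 0:
--                 parts.pop()
--         elif '' == part or '.' == part:
--             continue
--         else:
--             parts.append(part)
--     if not parts:
--         result = base + url[p:]
--         if result.startswith('//'):
--             return result[1:]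
--         return result
--     result = '{}{}{}'.format(base, '/'.join(parts), url[p:])
--     if result.startswith('//'):
--         return result[1:]
--     return result
-- ===== SOURCE B (Python) =====
-- def translate_url(base, url):
--     url = url.lstrip('/')
--     p = url.rfind('/')
--     if p == -1:
--         parts, tail = [], url
--     else:
--         parts, skip = [], 0
--         for seg in reversed(url[:p].split('/')):
--             if seg == '..':
--                 skip += 1
--             elif seg == '' or seg == '.':
--                 pass
--             elif skip > 0:
--                 skip -= 1
--             else:
--                 parts.insert(0, seg)
--         tail = url[p:]
--     result = (base if base.endswith('/') else base + '/') + '/'.join(parts) + tail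
--     return result[1:] if result.startswith('//') else result
-- ===== Notes on version B (the rewrite author's own statement) =====
-- stated objective: alternative
-- what changed: B collapses A's three return branches into a single result expression built with '/'.join (the empty join subsumes both fallbacks) and normalizes the directory segments by one right-to-left scan with an integer skip counter that front-inserts kept segments, instead of A's left-to-right stack with pops.
import Mathlib
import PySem

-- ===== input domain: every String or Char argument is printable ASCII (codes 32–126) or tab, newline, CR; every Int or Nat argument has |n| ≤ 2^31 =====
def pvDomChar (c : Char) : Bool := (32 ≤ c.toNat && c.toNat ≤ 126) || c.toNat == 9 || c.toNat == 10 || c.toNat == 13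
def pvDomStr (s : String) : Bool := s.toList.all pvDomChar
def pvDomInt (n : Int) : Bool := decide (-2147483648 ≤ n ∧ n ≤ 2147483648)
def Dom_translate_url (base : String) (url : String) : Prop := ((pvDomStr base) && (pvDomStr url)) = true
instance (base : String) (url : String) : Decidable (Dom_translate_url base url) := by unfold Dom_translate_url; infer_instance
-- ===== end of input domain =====

-- B collapses A's three return branches into one result expression ('/'.join of the kept parts,
-- empty join giving both fallbacks for free) and normalizes the directory segments by a
-- right-to-left scan with a skip counter that front-inserts kept segments, instead of A's
-- left-to-right stack with pops; same return value (alternative decomposition, no speed claim).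

-- ===== PORT A =====
-- loop body of A's 'for part in url[:p].split('/')' (parts.pop() on a nonempty list = dropLast)
def tuStepA (parts : List (List Char)) (part : List Char) : List (List Char) :=
  if part == ['.', '.'] then
    (if parts.length > 0 then parts.dropLast else parts)
  else if part == [] || part == ['.'] then parts
  else parts ++ [part]

-- A on code points; url.lstrip('/') is dropWhile (· == '/') (exact: single strip char)
def tuACore (base0 url0 : List Char) : List Char :=
  let base := if PySem.Chars.endswith base0 ['/'] then base0 else base0 ++ ['/']
  let url := url0.dropWhile (· == '/')
  let p := PySem.Chars.rfind url ['/']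
  if p == (-1 : Int) then
    let result := base ++ url
    if PySem.Chars.startswith result ['/', '/'] then PySem.List.slice result (some 1) none
    else result
  else
    let parts := (PySem.Chars.splitOn (PySem.List.slice url none (some p)) ['/']).foldl tuStepA []
    if parts == [] then
      let result := base ++ PySem.List.slice url (some p) none
      if PySem.Chars.startswith result ['/', '/'] then PySem.List.slice result (some 1) none
      else result
    else
      let result := base ++ PySem.Chars.join ['/'] parts ++ PySem.List.slice url (some p) none
      if PySem.Chars.startswith result ['/', '/'] then PySem.List.slice result (some 1) none
      else result

def translate_url (base : String) (url : String) : String :=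
  String.ofList (tuACore base.toList url.toList)

-- ===== PORT B =====
-- loop body of B's scan over reversed(url[:p].split('/')): state = (parts, skip);
-- parts.insert(0, seg) is 'seg :: parts'
def tuStepB (st : List (List Char) × Nat) (seg : List Char) : List (List Char) × Nat :=
  if seg == ['.', '.'] then (st.1, st.2 + 1)
  else if seg == [] || seg == ['.'] then st
  else if st.2 > 0 then (st.1, st.2 - 1)
  else (seg :: st.1, st.2)

-- B on code points: one result expression, every branch only picks (parts, tail)
def tuBCore (base0 url0 : List Char) : List Char :=
  let url := url0.dropWhile (· == '/')
  let p := PySem.Chars.rfind url ['/']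
  let pt : List (List Char) × List Char :=
    if p == (-1 : Int) then ([], url)
    else (((PySem.Chars.splitOn (PySem.List.slice url none (some p)) ['/']).reverse.foldl
             tuStepB ([], 0)).1,
          PySem.List.slice url (some p) none)
  let result := (if PySem.Chars.endswith base0 ['/'] then base0 else base0 ++ ['/'])
      ++ PySem.Chars.join ['/'] pt.1 ++ pt.2
  if PySem.Chars.startswith result ['/', '/'] then PySem.List.slice result (some 1) none
  else result

def translate_url_alt (base : String) (url : String) : String :=
  String.ofList (tuBCore base.toList url.toList)

-- ===== PRECONDITION & SPEC =====
def Spec_translate_url (base : String) (url : String) (out : String) : Prop := out = translate_url_alt base url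
instance (base : String) (url : String) (out : String) : Decidable (Spec_translate_url base url out) := by unfold Spec_translate_url; infer_instance

-- ===== CLAIM =====
def Claim_equal_translate_url : Prop := ∀ (base : String) (url : String), Dom_translate_url base url → Spec_translate_url base url (translate_url base url)

-- ===== LEMMAS AND PROOFS =====

-- recursive spec of B's right-to-left scan: (kept segments in order, leftover skip)
def tuNorm : List (List Char) → List (List Char) × Nat
  | [] => ([], 0)
  | h :: t =>
    let r := tuNorm t
    if h == ['.', '.'] then (r.1, r.2 + 1)
    else if h == [] || h == ['.'] then r
    else if r.2 > 0 then (r.1, r.2 - 1)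
    else (h :: r.1, r.2)

theorem tuFoldB_eq_norm (segs : List (List Char)) :
    segs.reverse.foldl tuStepB ([], 0) = tuNorm segs := by
  induction segs with
  | nil => rfl
  | cons h t ih =>
    simp only [List.reverse_cons, List.foldl_append, List.foldl_cons, List.foldl_nil, ih]
    rfl

-- A's stack run from any stack = the stack minus the leftover skips, then the kept segments
theorem tuFoldA_take (segs : List (List Char)) : ∀ (stack : List (List Char)),
    segs.foldl tuStepA stack =
      stack.take (stack.length - (tuNorm segs).2) ++ (tuNorm segs).1 := by
  induction segs with
  | nil => intro stack; simp [tuNorm]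
  | cons h t ih =>
    intro stack
    simp only [List.foldl_cons, tuNorm, tuStepA]
    split_ifs with h1 h2 h3 h4
    · -- '..' on a nonempty stack: pop = dropLast = take (len-1)
      rw [ih]
      simp only [List.dropLast_eq_take, List.take_take, List.length_take]
      congr 2
      omega
    · -- '..' on the empty stack
      have hnil : stack = [] := List.eq_nil_of_length_eq_zero (by omega)
      subst hnil
      simp [ih]
    · -- '' or '.'
      rw [ih]
    · -- kept-count positive: the segment is consumed by a pending '..'
      rw [ih, List.take_append_of_le_length (by simp; omega)]
      congr 2
      simp only [List.length_append, List.length_singleton]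
      omega
    · -- skip = 0: the segment is kept
      have hk : (tuNorm t).2 = 0 := by omega
      rw [ih, hk]
      simp only [Nat.sub_zero, List.length_append, List.length_singleton]
      rw [List.take_of_length_le (by simp), List.take_length]
      simp

theorem tuKept_eq_parts (segs : List (List Char)) :
    ((segs.reverse.foldl tuStepB ([], 0)).1) = segs.foldl tuStepA [] := by
  rw [tuFoldB_eq_norm, tuFoldA_take]
  simp

theorem tuCore_eq (base0 url0 : List Char) : tuACore base0 url0 = tuBCore base0 url0 := by
  have hj : PySem.Chars.join ['/'] [] = [] := rfl
  unfold tuACore tuBCore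
  simp only [tuKept_eq_parts]
  by_cases hp : PySem.Chars.rfind (url0.dropWhile (· == '/')) ['/'] = (-1 : Int)
  · simp [hp, hj]
  · simp only [beq_iff_eq, if_neg hp]
    by_cases hparts :
        (PySem.Chars.splitOn
          (PySem.List.slice (url0.dropWhile (· == '/')) none
            (some (PySem.Chars.rfind (url0.dropWhile (· == '/')) ['/']))) ['/']).foldl tuStepA [] = []
    · simp [hparts, hj]
    · simp [hparts]

-- ===== VERDICT =====
theorem translate_url_spec : Claim_equal_translate_url := by
  intro base url _
  unfold Spec_translate_url translate_url translate_url_alt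
  rw [tuCore_eq]
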